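-- pv_equiv track=rewrite | github.com/ruandqm/cash-na-nota-microsservice | shared/getTotalValue.py | find_largest_repeated
-- ===== SOURCE A (Python) =====
-- def find_largest_repeated(arr):
--     counts = {}
--     largest_repeated = None
--     for num in arr:
--         if num in counts:
--             counts[num] += 1
--         else:
--             counts[num] = 1
--         if counts[num] == 2:
--             if largest_repeated is None or num > largest_repeated:
--                 largest_repeated = num
--         elif counts[num] > 2 and num > largest_repeated:
--             largest_repeated = num
--     return largest_repeated
-- ===== SOURCE B (Python) =====
-- def find_largest_repeated(arr):
--     counts = {}
--     for num in arr:
--         counts[num] = counts.get(num, 0) + 1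
--     return max((n for n, c in counts.items() if c >= 2), default=None)
-- ===== Notes on version B (the rewrite author's own statement) =====
-- stated objective: simpler
-- what changed: Two distinct phases - build a full frequency table, then select the maximum among keys with count >= 2 via max(..., default=None) - instead of A's fused single pass that updates a running maximum with branching the moment a count reaches or exceeds 2.
import Mathlib
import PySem

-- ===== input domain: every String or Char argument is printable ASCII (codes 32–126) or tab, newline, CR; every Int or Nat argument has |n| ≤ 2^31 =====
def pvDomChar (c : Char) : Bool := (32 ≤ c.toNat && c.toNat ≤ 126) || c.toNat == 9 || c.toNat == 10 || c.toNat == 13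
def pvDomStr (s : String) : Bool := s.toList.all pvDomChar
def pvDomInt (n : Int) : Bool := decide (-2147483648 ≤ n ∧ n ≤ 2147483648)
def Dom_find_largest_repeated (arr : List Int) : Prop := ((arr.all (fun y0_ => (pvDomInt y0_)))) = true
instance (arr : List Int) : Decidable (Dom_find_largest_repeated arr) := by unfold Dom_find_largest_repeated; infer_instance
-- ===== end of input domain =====

-- B replaces A's fused counting-and-running-max loop by two phases: build the full
-- frequency table, then select max(keys with count >= 2, default=None); same O(n) cost.

-- ===== PORT A =====
-- A's single fused loop: state = (counts dict, running largest_repeated).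
-- In the `counts[num] > 2` branch Python compares `num > largest_repeated`; there
-- `largest_repeated` is provably not None (num already hit count 2 earlier), so the
-- unreachable `none` case of the match just keeps the state.
def find_largest_repeated (arr : List Int) : Option Int :=
  (arr.foldl (fun st num =>
      let counts :=
        if st.1.contains num then st.1.modify num 0 (· + 1) else st.1.insert num 1
      let largest :=
        if counts.getD num 0 == 2 then
          (match st.2 with
           | none => some num
           | some l => if num > l then some num else some l)
        else if counts.getD num 0 > 2 then
          (match st.2 with
           | some l => if num > l then some num else st.2
           | none => st.2)
        else st.2
      (counts, largest))
    ((PySem.Dict.empty : PySem.Dict Int Int), (none : Option Int))).2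

-- ===== PORT B =====
-- B, phase 1: counts[num] = counts.get(num, 0) + 1; phase 2: max over the items
-- whose count is >= 2, default None.
def find_largest_repeated_alt (arr : List Int) : Option Int :=
  let counts := arr.foldl (fun d num => d.insert num (d.getD num 0 + 1))
                  (PySem.Dict.empty : PySem.Dict Int Int)
  PySem.List.max? ((counts.items.filter (fun p => 2 ≤ p.2)).map (·.1)) (fun x => x)

-- ===== PRECONDITION & SPEC =====
def Spec_find_largest_repeated (arr : List Int) (out : Option Int) : Prop := out = find_largest_repeated_alt arr
instance (arr : List Int) (out : Option Int) : Decidable (Spec_find_largest_repeated arr out) := by unfold Spec_find_largest_repeated; infer_instance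

-- ===== CLAIM (what is proved, stated in full; the proofs are below) =====
def Claim_equal_find_largest_repeated : Prop := ∀ (arr : List Int), Dom_find_largest_repeated arr → Spec_find_largest_repeated arr (find_largest_repeated arr)

-- ===== LEMMAS AND PROOFS =====

-- "r is THE answer for arr": none iff nothing repeats, some m iff m is the largest repeated value.
def IsAns (arr : List Int) (r : Option Int) : Prop :=
  (r = none → ∀ v : Int, arr.count v ≤ 1) ∧
  (∀ m : Int, r = some m → 2 ≤ arr.count m ∧ ∀ v : Int, 2 ≤ arr.count v → v ≤ m)

theorem IsAns_unique (arr : List Int) (r₁ r₂ : Option Int)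
    (h₁ : IsAns arr r₁) (h₂ : IsAns arr r₂) : r₁ = r₂ := by
  obtain ⟨n₁, s₁⟩ := h₁; obtain ⟨n₂, s₂⟩ := h₂
  cases r₁ with
  | none =>
    cases r₂ with
    | none => rfl
    | some m => exact absurd (n₁ rfl m) (by have := (s₂ m rfl).1; omega)
  | some m₁ =>
    cases r₂ with
    | none => exact absurd (n₂ rfl m₁) (by have := (s₁ m₁ rfl).1; omega)
    | some m₂ =>
      obtain ⟨c₁, max₁⟩ := s₁ m₁ rfl
      obtain ⟨c₂, max₂⟩ := s₂ m₂ rfl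
      have h12 := max₁ m₂ c₂; have h21 := max₂ m₁ c₁
      exact congrArg some (le_antisymm h21 h12)

theorem B_isAns (arr : List Int) : IsAns arr (find_largest_repeated_alt arr) := by
  have halt : find_largest_repeated_alt arr =
      PySem.List.max? (((PySem.Dict.counter arr).items.filter (fun p => 2 ≤ p.2)).map (·.1))
        (fun x => x) := by
    simp only [find_largest_repeated_alt, PySem.Dict.foldl_insert_getD_add_one_eq_counter]
  rw [halt]
  have hmem : ∀ v : Int,
      v ∈ (((PySem.Dict.counter arr).items.filter (fun p => 2 ≤ p.2)).map (·.1)) ↔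
        2 ≤ arr.count v := by
    intro v
    rw [PySem.Dict.items_counter]
    constructor
    · intro hv
      obtain ⟨q, hq, rfl⟩ := List.mem_map.mp hv
      obtain ⟨hqmem, hqge⟩ := List.mem_filter.mp hq
      obtain ⟨k, hk, rfl⟩ := List.mem_map.mp hqmem
      have : (2 : Int) ≤ (arr.count k : Int) := by simpa using hqge
      exact_mod_cast this
    · intro hge
      apply List.mem_map.mpr
      refine ⟨(v, (arr.count v : Int)), List.mem_filter.mpr ⟨List.mem_map.mpr
        ⟨v, (PySem.Set.mem_ofList arr v).mpr (List.count_pos_iff.mp (by omega)), rfl⟩,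
        by simp; exact_mod_cast hge⟩, rfl⟩
  constructor
  · intro hnone v
    rw [PySem.List.max?_eq_none_iff] at hnone
    by_contra h
    have hv : v ∈ (((PySem.Dict.counter arr).items.filter (fun p => 2 ≤ p.2)).map (·.1)) :=
      (hmem v).mpr (by omega)
    rw [hnone] at hv
    simp at hv
  · intro m hsome
    have hmax := PySem.List.max?_isMax hsome
    refine ⟨(hmem m).mp (PySem.List.max?_mem hsome), ?_⟩
    intro v hv
    exact hmax v ((hmem v).mpr hv)

-- A's loop step.
def aStep (st : PySem.Dict Int Int × Option Int) (num : Int) : PySem.Dict Int Int × Option Int :=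
  let counts :=
    if st.1.contains num then st.1.modify num 0 (· + 1) else st.1.insert num 1
  let largest :=
    if counts.getD num 0 == 2 then
      (match st.2 with
       | none => some num
       | some l => if num > l then some num else some l)
    else if counts.getD num 0 > 2 then
      (match st.2 with
       | some l => if num > l then some num else st.2
       | none => st.2)
    else st.2
  (counts, largest)

theorem find_largest_repeated_eq_foldl (arr : List Int) :
    find_largest_repeated arr =
      (arr.foldl aStep ((PySem.Dict.empty : PySem.Dict Int Int), (none : Option Int))).2 := rfl

-- the dict update of one step is exactly "counter of one more element"
theorem step_counts (p : List Int) (num : Int) :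
    (if (PySem.Dict.counter p).contains num
      then (PySem.Dict.counter p).modify num 0 (· + 1)
      else (PySem.Dict.counter p).insert num 1) = PySem.Dict.counter (p ++ [num]) := by
  rw [PySem.Dict.counter_append_singleton]
  by_cases h : (PySem.Dict.counter p).contains num
  · simp [h]
  · simp only [h, Bool.false_eq_true, if_false, PySem.Dict.modify]
    rw [PySem.Dict.getD_of_not_contains _ _ (by simpa using h)]
    norm_num

theorem count_append_singleton (p : List Int) (num v : Int) :
    (p ++ [num]).count v = p.count v + (if num = v then 1 else 0) := by
  simp [List.count_append, List.count_singleton, beq_iff_eq]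

theorem A_loop (l : List Int) : ∀ (p : List Int) (r : Option Int), IsAns p r →
    (l.foldl aStep (PySem.Dict.counter p, r)).1 = PySem.Dict.counter (p ++ l) ∧
    IsAns (p ++ l) (l.foldl aStep (PySem.Dict.counter p, r)).2 := by
  induction l with
  | nil =>
    intro p r h
    exact ⟨by simp, by simpa using h⟩
  | cons num t ih =>
    intro p r h
    have hstep1 : (aStep (PySem.Dict.counter p, r) num).1 = PySem.Dict.counter (p ++ [num]) := by
      simp only [aStep]; exact step_counts p num
    have hcnt : (PySem.Dict.counter (p ++ [num])).getD num 0 = ((p ++ [num]).count num : Int) :=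
      PySem.Dict.getD_counter _ _
    have hcount : (p ++ [num]).count num = p.count num + 1 := by
      rw [count_append_singleton]; simp
    -- the new running max is the answer for p ++ [num]
    have hstep2 : IsAns (p ++ [num]) (aStep (PySem.Dict.counter p, r) num).2 := by
      obtain ⟨hnone, hsome⟩ := h
      simp only [aStep, step_counts, hcnt, hcount]
      by_cases h2 : p.count num = 1
      · -- the count becomes exactly 2: largest := max(largest, num)
        rw [if_pos (by simp [h2])]
        cases r with
        | none =>
          refine ⟨by intro h'; simp at h', ?_⟩
          intro m hm
          injection hm with hm; subst hm
          constructor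
          · rw [hcount, h2]
          · intro v hv
            rw [count_append_singleton] at hv
            by_cases hvn : num = v
            · omega
            · simp [hvn] at hv
              have := hnone rfl v; omega
        | some lv =>
          obtain ⟨hlc, hlmax⟩ := hsome lv rfl
          have hred : (match (some lv : Option Int) with
              | none => some num
              | some l => if num > l then some num else some l) =
              if num > lv then some num else some lv := rfl
          rw [hred]
          by_cases hgt : num > lv
          · rw [if_pos hgt]
            refine ⟨by intro h'; simp at h', ?_⟩
            intro m hm
            injection hm with hm; subst hm
            refine ⟨by rw [hcount, h2], ?_⟩
            intro v hv
            rw [count_append_singleton] at hv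
            by_cases hvn : num = v
            · omega
            · simp [hvn] at hv
              have := hlmax v (by omega); omega
          · rw [if_neg hgt]
            refine ⟨by intro h'; simp at h', ?_⟩
            intro m hm
            injection hm with hm; subst hm
            refine ⟨?_, ?_⟩
            · rw [count_append_singleton]
              by_cases hvn : num = lv
              · omega
              · simp [hvn]; omega
            · intro v hv
              rw [count_append_singleton] at hv
              by_cases hvn : num = v
              · omega
              · simp [hvn] at hv
                exact hlmax v (by omega)
      · by_cases h0 : p.count num = 0
        · -- first occurrence of num: the running max is unchanged
          rw [if_neg (by simp [h0])]
          rw [if_neg (by simp [h0])]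
          constructor
          · intro hr v
            rw [count_append_singleton]
            have := hnone hr v
            by_cases hvn : num = v
            · subst hvn; simp; omega
            · simp [hvn]; omega
          · intro m hm
            obtain ⟨hc, hmax⟩ := hsome m hm
            refine ⟨?_, ?_⟩
            · rw [count_append_singleton]; omega
            · intro v hv
              rw [count_append_singleton] at hv
              by_cases hvn : num = v
              · subst hvn; rw [if_pos rfl] at hv; omega
              · simp [hvn] at hv
                exact hmax v hv
        · -- the count was already ≥ 2: r = some lv with num ≤ lv, nothing changes
          have hge2 : 2 ≤ p.count num := by omega
          rw [if_neg (by simp; omega)]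
          rw [if_pos (by push_cast; omega)]
          cases r with
          | none => exact absurd (hnone rfl num) (by omega)
          | some lv =>
            obtain ⟨hlc, hlmax⟩ := hsome lv rfl
            have hle : num ≤ lv := hlmax num hge2
            have hred : (match (some lv : Option Int) with
                | some l => if num > l then some num else (some lv : Option Int)
                | none => some lv) =
                if num > lv then some num else some lv := rfl
            rw [hred, if_neg (by omega)]
            refine ⟨by intro h'; simp at h', ?_⟩
            intro m hm
            injection hm with hm; subst hm
            refine ⟨?_, ?_⟩
            · rw [count_append_singleton]
              by_cases hvn : num = lv
              · omega
              · simp [hvn]; omega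
            · intro v hv
              rw [count_append_singleton] at hv
              by_cases hvn : num = v
              · omega
              · simp [hvn] at hv
                exact hlmax v hv
    have hrepack : aStep (PySem.Dict.counter p, r) num =
        (PySem.Dict.counter (p ++ [num]), (aStep (PySem.Dict.counter p, r) num).2) := by
      rw [← hstep1]
    have hrest := ih (p ++ [num]) (aStep (PySem.Dict.counter p, r) num).2 hstep2
    simp only [List.foldl_cons]
    rw [hrepack]
    simpa [List.append_assoc] using hrest

theorem A_isAns (arr : List Int) : IsAns arr (find_largest_repeated arr) := by
  rw [find_largest_repeated_eq_foldl]
  have hinit : IsAns ([] : List Int) (none : Option Int) := by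
    constructor
    · intro _ v; simp
    · intro m hm; cases hm
  have hres := (A_loop arr [] none hinit).2
  have hce : PySem.Dict.counter ([] : List Int) = (PySem.Dict.empty : PySem.Dict Int Int) := rfl
  rw [hce] at hres
  simpa using hres

-- ===== VERDICT (by name: the statement is the Claim_ definition above) =====
theorem find_largest_repeated_spec : Claim_equal_find_largest_repeated := by
  intro arr _
  exact IsAns_unique arr _ _ (A_isAns arr) (B_isAns arr)
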